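-- pv_equiv track=rewrite | github.com/baehyunsol/h_math | eval/utils.py | _split
-- ===== SOURCE A (Python) =====
-- from collections import deque
--
-- symbols = (
--     '(', ')', '{', '}', '[', ']',
--     '<', '>', '=', '!',
--     '+', '-', '*', '/', '%',
--     ',', ':', '.', '\n', '#',
--     '@', '&', '|', ';', ' ', '^',
--     '`'
-- )
--
-- def _split(code):
--
--     tokens = deque()
--
--     ii = 0
--
--     for i, t in enumerate(code):
--
--         if t in symbols:
--             tokens.append(code[ii:i])
--             tokens.append(t)
--             ii = i + 1
--
--     tokens.append(code[ii:])
--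
--     return list(tokens)
-- ===== SOURCE B (Python) =====
-- symbols = (
--     '(', ')', '{', '}', '[', ']',
--     '<', '>', '=', '!',
--     '+', '-', '*', '/', '%',
--     ',', ':', '.', '\n', '#',
--     '@', '&', '|', ';', ' ', '^',
--     '`'
-- )
--
-- _symset = frozenset(symbols)
--
-- def _split(code):
--     out = []
--     cur = []
--     for t in code:
--         if t in _symset:
--             out.append(''.join(cur))
--             out.append(t)
--             cur = []
--         else:
--             cur.append(t)
--     out.append(''.join(cur))
--     return out
-- ===== Notes on version B (the rewrite author's own statement) =====
-- stated objective: faster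
-- what changed: B drops A's cut-index/slice bookkeeping (deque, enumerate, ii, code[ii:i]): it collects the current token's characters in a buffer list, flushing it with str.join on each symbol, and tests membership in a frozenset.
import Mathlib
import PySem

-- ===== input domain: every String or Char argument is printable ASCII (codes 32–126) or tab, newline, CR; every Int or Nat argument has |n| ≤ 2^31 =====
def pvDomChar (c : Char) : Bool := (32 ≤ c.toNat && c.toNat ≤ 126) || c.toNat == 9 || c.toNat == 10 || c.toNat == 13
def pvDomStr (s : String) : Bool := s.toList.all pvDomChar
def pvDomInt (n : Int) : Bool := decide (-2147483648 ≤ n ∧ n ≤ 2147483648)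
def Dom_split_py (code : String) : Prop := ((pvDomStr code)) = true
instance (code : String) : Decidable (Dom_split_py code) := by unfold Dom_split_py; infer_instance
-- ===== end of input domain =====

-- B replaces A's cut-index + slice bookkeeping by growing the current token in place; objective: faster on this tokenizer by a constant factor (buffer+join, set membership) measured.

-- ===== PORT A =====
-- the module-level tuple `symbols`
def pySymbols : List Char :=
  ['(', ')', '{', '}', '[', ']',
   '<', '>', '=', '!',
   '+', '-', '*', '/', '%',
   ',', ':', '.', '\n', '#',
   '@', '&', '|', ';', ' ', '^',
   '`']

-- loop body of A: state = (tokens, ii); on a symbol at index i, append code[ii:i] and the symbol, set ii = i+1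
def splitStepA (cs : List Char) (st : List String × Int) (p : Int × Char) : List String × Int :=
  if pySymbols.contains p.2 then
    (st.1 ++ [String.ofList (PySem.List.slice cs (some st.2) (some p.1)), String.ofList [p.2]], p.1 + 1)
  else st

def split_py (code : String) : List String :=
  let cs := code.toList
  let fin := (PySem.List.enumerate cs 0).foldl (splitStepA cs) ([], 0)
  fin.1 ++ [String.ofList (PySem.List.slice cs (some fin.2) none)]   -- tokens.append(code[ii:])

-- ===== PORT B =====
-- loop body of B: state = (out's front, out's growing last token as chars); out[-1] += t, or flush on a symbol
def splitStepB (st : List String × List Char) (t : Char) : List String × List Char :=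
  if pySymbols.contains t then
    (st.1 ++ [String.ofList st.2, String.ofList [t]], [])
  else (st.1, st.2 ++ [t])

def split_py_alt (code : String) : List String :=
  let fin := code.toList.foldl splitStepB ([], [])
  fin.1 ++ [String.ofList fin.2]

-- ===== PRECONDITION & SPEC =====
def Spec_split_py (code : String) (out : List String) : Prop := out = split_py_alt code
instance (code : String) (out : List String) : Decidable (Spec_split_py code out) := by unfold Spec_split_py; infer_instance

-- ===== CLAIM (what is proved, stated in full; the proofs are below) =====
def Claim_equal_split_py : Prop := ∀ (code : String), Dom_split_py code → Spec_split_py code (split_py code)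

-- ===== LEMMAS AND PROOFS =====

-- the two loops, run over the same suffix `rest` from matching states, produce the same final output:
-- A's cut index ii corresponds to B's pending token `pre.drop ii`
theorem split_loops_agree (cs : List Char) :
    ∀ (rest pre : List Char) (toks : List String) (ii : Nat),
      ii ≤ pre.length → cs = pre ++ rest →
      (let a := (PySem.List.enumerate rest (pre.length : Int)).foldl (splitStepA cs) (toks, (ii : Int));
       a.1 ++ [String.ofList (PySem.List.slice cs (some a.2) none)])
      = (let b := rest.foldl splitStepB (toks, pre.drop ii);
         b.1 ++ [String.ofList b.2]) := by
  intro rest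
  induction rest with
  | nil =>
    intro pre toks ii hle hcs
    simp only [PySem.List.enumerate_nil, List.foldl_nil]
    rw [PySem.List.slice_from_natCast]
    subst hcs; simp
  | cons t rs ih =>
    intro pre toks ii hle hcs
    simp only [PySem.List.enumerate_cons, List.foldl_cons]
    by_cases hsym : pySymbols.contains t
    · have hslice : PySem.List.slice cs (some (ii : Int)) (some (pre.length : Int))
          = pre.drop ii := by
        rw [PySem.List.slice_natCast, hcs, List.drop_append_of_le_length hle]
        have : (pre.drop ii).length = pre.length - ii := by simp
        rw [List.take_append_of_le_length (by omega), List.take_of_length_le (by omega)]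
      simp only [splitStepA, splitStepB, hsym, if_pos, hslice]
      have h1 : (pre.length : Int) + 1 = ((pre ++ [t]).length : Int) := by simp
      have h2 : (pre.length : Int) + 1 = (((pre ++ [t]).length : Nat) : Int) := h1
      rw [h2]
      have := ih (pre ++ [t]) (toks ++ [String.ofList (pre.drop ii), String.ofList [t]])
        ((pre ++ [t]).length) (le_refl _) (by simpa using hcs)
      simpa using this
    · simp only [splitStepA, splitStepB, hsym, if_neg, Bool.false_eq_true, not_false_iff]
      have := ih (pre ++ [t]) toks ii (by simp; omega) (by simpa using hcs)
      have hdrop : (pre ++ [t]).drop ii = pre.drop ii ++ [t] :=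
        List.drop_append_of_le_length hle
      rw [hdrop] at this
      simpa [Nat.cast_add] using this

-- ===== VERDICT (by name: the statement is the Claim_ definition above) =====
theorem split_py_spec : Claim_equal_split_py := by
  intro code _
  unfold Spec_split_py split_py split_py_alt
  have := split_loops_agree code.toList code.toList [] [] 0 (by simp) (by simp)
  simpa using this
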